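-- pv_equiv track=rewrite | github.com/PPJUST/QuickMove | module/function_normal.py | check_filename_feasible
-- ===== SOURCE A (Python) =====
-- def check_filename_feasible(filename: str):
--     """检查一个文件名是否符合Windows文件命名规范"""
--     # 官方文档：文件和文件夹不能命名为“.”或“..”，也不能包含以下任何字符: \ / : * ? " < > |
--     except_word = ['\\', '/', ':', '*', '?', '"', '<', '>', '|']
--
--     # 检查.
--     if filename[0] == '.':
--         return False
--
--     # 检查其余符号
--     for key in except_word:
--         if key in filename:
--             return False
--     return True
-- ===== SOURCE B (Python) =====
-- def check_filename_feasible(filename: str):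
--     """检查一个文件名是否符合Windows文件命名规范"""
--     if filename[0] == '.':
--         return False
--     # delete every forbidden character; the name is feasible iff nothing was deleted
--     cleaned = filename.translate({ord(c): None for c in '\\/:*?"<>|'})
--     return len(cleaned) == len(filename)
-- ===== Notes on version B (the rewrite author's own statement) =====
-- stated objective: alternative
-- what changed: Instead of scanning the filename once per blacklisted character, B deletes all forbidden characters in one str.translate pass and declares the name feasible iff the cleaned string kept its length (a count-preservation test instead of membership scans).
import Mathlib
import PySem

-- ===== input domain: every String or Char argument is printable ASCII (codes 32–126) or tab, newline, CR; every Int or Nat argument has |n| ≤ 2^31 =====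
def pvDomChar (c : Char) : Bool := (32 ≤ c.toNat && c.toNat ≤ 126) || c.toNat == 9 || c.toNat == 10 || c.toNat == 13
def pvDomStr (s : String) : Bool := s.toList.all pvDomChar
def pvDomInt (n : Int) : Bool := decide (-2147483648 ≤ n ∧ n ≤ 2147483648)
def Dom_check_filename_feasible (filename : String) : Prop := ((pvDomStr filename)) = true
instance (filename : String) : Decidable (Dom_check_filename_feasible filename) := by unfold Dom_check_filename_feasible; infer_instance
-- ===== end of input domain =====

-- B: same leading-dot guard, but instead of scanning the filename once per blacklisted
-- character, B deletes the forbidden characters in one str.translate pass and declares the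
-- name feasible iff the cleaned string kept its length — alternative algorithm, same cost class.

-- ===== PORT A =====
def check_filename_feasible (filename : String) : Bool :=
  let except_word : List String := ["\\", "/", ":", "*", "?", "\"", "<", ">", "|"]
  match PySem.Str.pyGet? filename 0 with
  | none => false   -- filename[0] raises IndexError on ""; excluded by Pre_
  | some c =>
    if c == '.' then false
    else if except_word.any (fun key => PySem.Str.isIn key filename) then false
    else true

-- ===== PORT B =====
-- the translate table {ord(c): None for c in '\\/:*?"<>|'} : int keys mapped to None (= delete)
def pvTransTable : PySem.Dict Nat (Option Char) :=
  PySem.Dict.ofList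
    (['\\', '/', ':', '*', '?', '"', '<', '>', '|'].map (fun c => (c.toNat, none)))

-- str.translate with this table, ported by hand (exact: a char is dropped iff its code maps
-- to None in the table, kept unchanged otherwise; all table values here are None)
def pvTranslate (cs : List Char) : List Char :=
  cs.filter (fun ch =>
    match PySem.Dict.get? pvTransTable ch.toNat with
    | some none => false
    | _ => true)

def check_filename_feasible_alt (filename : String) : Bool :=
  match PySem.Str.pyGet? filename 0 with
  | none => false   -- filename[0] raises IndexError on ""; excluded by Pre_
  | some c =>
    if c == '.' then false
    else (pvTranslate filename.toList).length == filename.toList.length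

-- ===== PRECONDITION & SPEC =====
-- Pre_ excludes only the empty string, on which A's filename[0] raises IndexError (B raises too).
def Pre_check_filename_feasible (filename : String) : Prop := filename ≠ ""
instance (filename : String) : Decidable (Pre_check_filename_feasible filename) := by unfold Pre_check_filename_feasible; infer_instance
def pvWitness_check_filename_feasible : String := "a"

def Spec_check_filename_feasible (filename : String) (out : Bool) : Prop := out = check_filename_feasible_alt filename
instance (filename : String) (out : Bool) : Decidable (Spec_check_filename_feasible filename out) := by unfold Spec_check_filename_feasible; infer_instance

-- ===== CLAIM =====
def Claim_equal_check_filename_feasible : Prop := ∀ (filename : String), Dom_check_filename_feasible filename → Pre_check_filename_feasible filename → Spec_check_filename_feasible filename (check_filename_feasible filename)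

-- ===== LEMMAS AND PROOFS =====

-- the translate-table keep-predicate is exactly "not a forbidden character"
theorem keep_eq (c : Char) :
    (match PySem.Dict.get? pvTransTable c.toNat with
     | some none => false
     | _ => true)
      = !(['\\', '/', ':', '*', '?', '"', '<', '>', '|'].contains c) := by
  have hcode : ∀ k : Char, c.toNat = k.toNat → c = k := by
    intro k hk; exact Char.ext (UInt32.toNat_inj.mp hk)
  by_cases h : c ∈ ['\\', '/', ':', '*', '?', '"', '<', '>', '|']
  · fin_cases h <;> decide
  · simp only [List.mem_cons, List.not_mem_nil, or_false] at h
    push_neg at h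
    obtain ⟨h1, h2, h3, h4, h5, h6, h7, h8, h9⟩ := h
    have htab : pvTransTable = PySem.Dict.mk [(92, none), (47, none), (58, none), (42, none),
        (63, none), (34, none), (60, none), (62, none), (124, none)] := by rfl
    have g : PySem.Dict.get? pvTransTable c.toNat = none := by
      rw [htab]
      simp only [PySem.Dict.get?_mk_cons, beq_iff_eq]
      split_ifs with a1 a2 a3 a4 a5 a6 a7 a8 a9 <;>
        first
        | (exfalso;
           first
           | exact h1 (hcode _ a1.symm) | exact h2 (hcode _ a2.symm)
           | exact h3 (hcode _ a3.symm) | exact h4 (hcode _ a4.symm)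
           | exact h5 (hcode _ a5.symm) | exact h6 (hcode _ a6.symm)
           | exact h7 (hcode _ a7.symm) | exact h8 (hcode _ a8.symm)
           | exact h9 (hcode _ a9.symm))
        | rfl
    rw [g]
    simp [List.contains_eq_mem, h1, h2, h3, h4, h5, h6, h7, h8, h9]

-- A's nine substring scans decide the same thing as B's length-preservation test
theorem scan_eq_translate (cs : List Char) :
    (["\\", "/", ":", "*", "?", "\"", "<", ">", "|"].any
        (fun key => PySem.Chars.isIn key.toList cs))
      = !((pvTranslate cs).length == cs.length) := by
  have hL : (["\\", "/", ":", "*", "?", "\"", "<", ">", "|"].any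
        (fun key => PySem.Chars.isIn key.toList cs)) = true ↔
      ∃ c ∈ cs, c ∈ ['\\', '/', ':', '*', '?', '"', '<', '>', '|'] := by
    simp only [List.any_eq_true]
    constructor
    · rintro ⟨key, hk, hin⟩
      rw [PySem.Chars.isIn_iff_infix] at hin
      fin_cases hk <;>
        exact ⟨_, (List.singleton_infix_iff _ _).mp hin, by decide⟩
    · rintro ⟨c, hc, hmem⟩
      fin_cases hmem <;>
        [exact ⟨"\\", by decide, by rw [PySem.Chars.isIn_iff_infix]; exact (List.singleton_infix_iff _ _).mpr hc⟩;
         exact ⟨"/", by decide, by rw [PySem.Chars.isIn_iff_infix]; exact (List.singleton_infix_iff _ _).mpr hc⟩;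
         exact ⟨":", by decide, by rw [PySem.Chars.isIn_iff_infix]; exact (List.singleton_infix_iff _ _).mpr hc⟩;
         exact ⟨"*", by decide, by rw [PySem.Chars.isIn_iff_infix]; exact (List.singleton_infix_iff _ _).mpr hc⟩;
         exact ⟨"?", by decide, by rw [PySem.Chars.isIn_iff_infix]; exact (List.singleton_infix_iff _ _).mpr hc⟩;
         exact ⟨"\"", by decide, by rw [PySem.Chars.isIn_iff_infix]; exact (List.singleton_infix_iff _ _).mpr hc⟩;
         exact ⟨"<", by decide, by rw [PySem.Chars.isIn_iff_infix]; exact (List.singleton_infix_iff _ _).mpr hc⟩;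
         exact ⟨">", by decide, by rw [PySem.Chars.isIn_iff_infix]; exact (List.singleton_infix_iff _ _).mpr hc⟩;
         exact ⟨"|", by decide, by rw [PySem.Chars.isIn_iff_infix]; exact (List.singleton_infix_iff _ _).mpr hc⟩]
  have hAll : ((pvTranslate cs).length = cs.length) ↔
      ∀ c ∈ cs, c ∉ ['\\', '/', ':', '*', '?', '"', '<', '>', '|'] := by
    unfold pvTranslate
    rw [List.length_filter_eq_length_iff]
    constructor
    · intro hall c hc
      have := hall c hc; rw [keep_eq c] at this
      simpa [List.contains_eq_mem] using this
    · intro hno c hc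
      rw [keep_eq c]
      simpa [List.contains_eq_mem] using hno c hc
  have hR : (!((pvTranslate cs).length == cs.length)) = true ↔
      ∃ c ∈ cs, c ∈ ['\\', '/', ':', '*', '?', '"', '<', '>', '|'] := by
    simp only [Bool.not_eq_true', beq_eq_false_iff_ne, ne_eq]
    rw [hAll]
    simp only [not_forall, not_not]
    simp
  cases h : (["\\", "/", ":", "*", "?", "\"", "<", ">", "|"].any
      (fun key => PySem.Chars.isIn key.toList cs))
  · cases h2 : (!((pvTranslate cs).length == cs.length))
    · rfl
    · exact absurd (hL.mpr (hR.mp h2)) (by simp [h])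
  · exact (hR.mpr (hL.mp h)).symm

-- ===== VERDICT =====
theorem check_filename_feasible_spec : Claim_equal_check_filename_feasible := by
  intro filename _ _
  unfold Spec_check_filename_feasible check_filename_feasible check_filename_feasible_alt
  cases PySem.Str.pyGet? filename 0 with
  | none => rfl
  | some c =>
    by_cases hc : c == '.'
    · simp [hc]
    · have h := scan_eq_translate filename.toList
      simp only [PySem.Str.isIn, hc, Bool.false_eq_true, if_false, h]
      cases ((pvTranslate filename.toList).length == filename.toList.length) <;> simp
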